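-- pv_equiv track=rewrite | github.com/romeorizzi/temi_prog_public | 2019.02.27.recupero/all-CMS-submissions-2019-02-27/20190227T102031.VR429228000.conta-minimi-storici.py | conta_minimi_storici_dispari
-- ===== SOURCE A (Python) =====
-- def conta_minimi_storici_dispari(st_list):
--     s=len(st_list)
--     i=0
--     j=0
--     count=0
--     while(i<s):
--         j=0
--         t=True
--         while(j<i):
--             if st_list[j]<st_list[i]:
--                 t=False
--             j=j+1
--         if t==True:
--             if (st_list[i]%2)!=0:
--                 count=count+1
--         i=i+1
--
--
--     return count
-- ===== SOURCE B (Python) =====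
-- def conta_minimi_storici_dispari(st_list):
--     count = 0
--     m = None
--     for x in st_list:
--         if m is None or x <= m:
--             m = x
--             if x % 2 != 0:
--                 count += 1
--     return count
-- ===== Notes on version B (the rewrite author's own statement) =====
-- stated objective: faster
-- what changed: Replaced the quadratic rescan of all earlier elements for each position by a single pass that keeps the running minimum: an element is a record-minimum iff it is <= the running minimum.
import Mathlib
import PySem

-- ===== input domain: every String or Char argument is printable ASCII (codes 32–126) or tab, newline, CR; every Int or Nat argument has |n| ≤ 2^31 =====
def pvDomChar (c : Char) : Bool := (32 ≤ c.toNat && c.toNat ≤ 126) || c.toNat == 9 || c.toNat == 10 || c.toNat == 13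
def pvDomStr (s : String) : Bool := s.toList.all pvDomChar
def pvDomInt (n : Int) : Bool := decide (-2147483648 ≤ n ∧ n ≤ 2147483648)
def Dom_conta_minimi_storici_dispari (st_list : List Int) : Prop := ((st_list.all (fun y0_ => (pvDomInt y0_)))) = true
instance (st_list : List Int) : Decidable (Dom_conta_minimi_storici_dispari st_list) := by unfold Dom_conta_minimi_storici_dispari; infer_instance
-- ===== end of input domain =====

-- B replaces A's quadratic rescan of all earlier elements by a single pass with a running minimum (objective: faster).

-- ===== PORT A =====
-- A: outer while over indices i, inner while over j < i setting t := false if st_list[j] < st_list[i]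
def conta_minimi_storici_dispari (st_list : List Int) : Int :=
  (List.range st_list.length).foldl
    (fun count i =>
      let t := (List.range i).foldl
        (fun t j => if st_list.getD j 0 < st_list.getD i 0 then false else t) true
      if t = true then
        (if PySem.Int.mod (st_list.getD i 0) 2 ≠ 0 then count + 1 else count)
      else count)
    0

-- ===== PORT B =====
-- B: single pass; state = (count, running minimum so far as Option)
def conta_minimi_storici_dispari_alt (st_list : List Int) : Int :=
  (st_list.foldl
    (fun (st : Int × Option Int) x =>
      match st.2 with
      | none => ((if PySem.Int.mod x 2 ≠ 0 then st.1 + 1 else st.1), some x)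
      | some m =>
          if x ≤ m then ((if PySem.Int.mod x 2 ≠ 0 then st.1 + 1 else st.1), some x)
          else st)
    (0, none)).1

-- ===== PRECONDITION & SPEC =====
def Spec_conta_minimi_storici_dispari (st_list : List Int) (out : Int) : Prop := out = conta_minimi_storici_dispari_alt st_list
instance (st_list : List Int) (out : Int) : Decidable (Spec_conta_minimi_storici_dispari st_list out) := by unfold Spec_conta_minimi_storici_dispari; infer_instance

-- ===== CLAIM (what is proved, stated in full; the proofs are below) =====
def Claim_equal_conta_minimi_storici_dispari : Prop := ∀ (st_list : List Int), Dom_conta_minimi_storici_dispari st_list → Spec_conta_minimi_storici_dispari st_list (conta_minimi_storici_dispari st_list)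

-- ===== LEMMAS AND PROOFS =====

-- pure count function describing B: m is the running minimum (none = no element yet)
def pvCnt : Option Int → List Int → Int
  | _, [] => 0
  | none, x :: xs => (if PySem.Int.mod x 2 ≠ 0 then 1 else 0) + pvCnt (some x) xs
  | some m, x :: xs =>
      if x ≤ m then (if PySem.Int.mod x 2 ≠ 0 then 1 else 0) + pvCnt (some x) xs
      else pvCnt (some m) xs

-- B's fold computes c + pvCnt m xs in its first component
lemma pvB_fold (xs : List Int) : ∀ (c : Int) (m : Option Int),
    (xs.foldl
      (fun (st : Int × Option Int) x =>
        match st.2 with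
        | none => ((if PySem.Int.mod x 2 ≠ 0 then st.1 + 1 else st.1), some x)
        | some m =>
            if x ≤ m then ((if PySem.Int.mod x 2 ≠ 0 then st.1 + 1 else st.1), some x)
            else st)
      (c, m)).1 = c + pvCnt m xs := by
  induction xs with
  | nil => intro c m; simp [pvCnt]
  | cons x xs ih =>
    intro c m
    cases m with
    | none =>
      simp only [List.foldl_cons, pvCnt, ih]
      split_ifs <;> ring
    | some m =>
      by_cases hx : x ≤ m
      · simp only [List.foldl_cons, pvCnt, hx, if_pos, ih]
        split_ifs <;> ring
      · simp only [List.foldl_cons, pvCnt, hx, if_neg, ih, not_false_iff]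

lemma pvB_eq (xs : List Int) : conta_minimi_storici_dispari_alt xs = pvCnt none xs := by
  unfold conta_minimi_storici_dispari_alt
  simpa using pvB_fold xs 0 none

-- whether x is ≤ the old minimum m (if any) and ≤ every element of ys
def pvOk (m : Option Int) (ys : List Int) (x : Int) : Bool :=
  (match m with | none => true | some a => decide (x ≤ a)) && ys.all (fun y => decide (x ≤ y))

lemma pvCnt_append (ys : List Int) : ∀ (m : Option Int) (x : Int),
    pvCnt m (ys ++ [x]) =
      pvCnt m ys + (if pvOk m ys x = true ∧ PySem.Int.mod x 2 ≠ 0 then 1 else 0) := by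
  induction ys with
  | nil =>
    intro m x
    cases m with
    | none =>
      simp only [List.nil_append, pvCnt, pvOk, List.all_nil, Bool.and_true]
      split_ifs <;> simp_all
    | some a =>
      simp only [List.nil_append, pvCnt, pvOk, List.all_nil, Bool.and_true]
      split_ifs <;> simp_all <;> omega
  | cons y ys ih =>
    intro m x
    cases m with
    | none =>
      simp only [List.cons_append, pvCnt, ih]
      have h : pvOk (some y) ys x = pvOk none (y :: ys) x := by
        simp [pvOk]
      rw [h]
      try ring
    | some a =>
      by_cases hy : y ≤ a
      · simp only [List.cons_append, pvCnt, hy, if_pos, ih]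
        have h : pvOk (some y) ys x = pvOk (some a) (y :: ys) x := by
          simp only [pvOk, List.all_cons]
          cases hxy : decide (x ≤ y) <;> cases hxa : decide (x ≤ a) <;>
            simp_all <;> omega
        rw [h]
        try ring
      · simp only [List.cons_append, pvCnt, hy, if_neg, not_false_iff, ih]
        have h : pvOk (some a) ys x = pvOk (some a) (y :: ys) x := by
          simp only [pvOk, List.all_cons]
          cases hxy : decide (x ≤ y) <;> cases hxa : decide (x ≤ a) <;>
            simp_all <;> omega
        rw [h]
        try ring

-- A's inner loop over a list of indices is an `all`
lemma pvInner (l : List Nat) (g : Nat → Int) (v : Int) : ∀ (b : Bool),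
    l.foldl (fun t j => if g j < v then false else t) b
      = (b && l.all (fun j => !decide (g j < v))) := by
  induction l with
  | nil => simp
  | cons j l ih =>
    intro b
    rw [List.foldl_cons, ih]
    cases b <;> by_cases h : g j < v <;> simp [h]

-- A's condition at the last index of ys ++ [x] equals pvOk none ys x
lemma pvCond (ys : List Int) (x : Int) :
    (List.range ys.length).all (fun j => !decide (ys.getD j 0 < x)) = pvOk none ys x := by
  simp only [pvOk]
  cases hall : ys.all (fun y => decide (x ≤ y)) with
  | true =>
    rw [Bool.true_and, List.all_eq_true]
    intro j hjm
    have hj := List.mem_range.mp hjm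
    rw [List.getD_eq_getElem _ _ hj]
    have := List.all_eq_true.mp hall (ys[j]) (List.getElem_mem hj)
    simpa using this
  | false =>
    simp only [Bool.true_and]
    rw [List.all_eq_false] at hall
    rw [List.all_eq_false]
    obtain ⟨y, hy, hny⟩ := hall
    obtain ⟨j, hj, rfl⟩ := List.mem_iff_getElem.mp hy
    refine ⟨j, List.mem_range.mpr hj, ?_⟩
    rw [List.getD_eq_getElem _ _ hj]
    simpa using hny

lemma pvFoldl_congr {α β : Type} (l : List β) (f g : α → β → α) (init : α)
    (h : ∀ acc x, x ∈ l → f acc x = g acc x) : l.foldl f init = l.foldl g init := by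
  induction l generalizing init with
  | nil => rfl
  | cons b l ih =>
    rw [List.foldl_cons, List.foldl_cons, h init b (by simp)]
    exact ih _ (fun acc x hx => h acc x (by simp [hx]))

lemma pvAll_congr {β : Type} (l : List β) (p q : β → Bool) (h : ∀ x ∈ l, p x = q x) :
    l.all p = l.all q := by
  induction l with
  | nil => rfl
  | cons b l ih =>
    rw [List.all_cons, List.all_cons, h b (by simp)]
    rw [ih (fun x hx => h x (by simp [hx]))]

-- A on ys ++ [x] = A on ys + contribution of x
lemma pvA_append (ys : List Int) (x : Int) :
    conta_minimi_storici_dispari (ys ++ [x]) =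
      conta_minimi_storici_dispari ys
        + (if pvOk none ys x = true ∧ PySem.Int.mod x 2 ≠ 0 then 1 else 0) := by
  unfold conta_minimi_storici_dispari
  have hlen : (ys ++ [x]).length = ys.length + 1 := by simp
  rw [hlen, List.range_succ, List.foldl_append]
  have hget : ∀ k, k < ys.length → (ys ++ [x]).getD k 0 = ys.getD k 0 := by
    intro k hk
    rw [List.getD_eq_getElem _ _ (by simp; omega), List.getD_eq_getElem _ _ hk]
    exact List.getElem_append_left hk
  have hlast : (ys ++ [x]).getD ys.length 0 = x := by
    rw [List.getD_eq_getElem _ _ (by simp)]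
    simp
  have hpre :
      (List.range ys.length).foldl
        (fun count i =>
          let t := (List.range i).foldl
            (fun t j => if (ys ++ [x]).getD j 0 < (ys ++ [x]).getD i 0 then false else t) true
          if t = true then
            (if PySem.Int.mod ((ys ++ [x]).getD i 0) 2 ≠ 0 then count + 1 else count)
          else count) (0 : Int)
      = (List.range ys.length).foldl
        (fun count i =>
          let t := (List.range i).foldl
            (fun t j => if ys.getD j 0 < ys.getD i 0 then false else t) true
          if t = true then
            (if PySem.Int.mod (ys.getD i 0) 2 ≠ 0 then count + 1 else count)
          else count) (0 : Int) := by
    refine pvFoldl_congr _ _ _ _ ?_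
    intro a i hi
    have hi' : i < ys.length := List.mem_range.mp hi
    have h1 : (List.range i).foldl
        (fun t j => if (ys ++ [x]).getD j 0 < ys.getD i 0 then false else t) true
        = (List.range i).foldl
        (fun t j => if ys.getD j 0 < ys.getD i 0 then false else t) true := by
      refine pvFoldl_congr _ _ _ _ ?_
      intro b j hj
      have hj' : j < ys.length := lt_trans (List.mem_range.mp hj) hi'
      rw [hget j hj']
    simp only [hget i hi', h1]
  rw [List.foldl_cons, List.foldl_nil, hpre]
  have hc : ((List.range ys.length).foldl
        (fun t j => if (ys ++ [x]).getD j 0 < (ys ++ [x]).getD ys.length 0 then false else t)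
        true) = pvOk none ys x := by
    rw [pvInner, Bool.true_and, ← pvCond]
    refine pvAll_congr _ _ _ ?_
    intro j hj
    rw [hget j (List.mem_range.mp hj), hlast]
  rw [hc, hlast]
  set c := (List.range ys.length).foldl
        (fun count i =>
          let t := (List.range i).foldl
            (fun t j => if ys.getD j 0 < ys.getD i 0 then false else t) true
          if t = true then
            (if PySem.Int.mod (ys.getD i 0) 2 ≠ 0 then count + 1 else count)
          else count) (0 : Int) with hcdef
  by_cases hok : pvOk none ys x = true
  · by_cases hodd : PySem.Int.mod x 2 ≠ 0
    · rw [if_pos hok, if_pos hodd, if_pos ⟨hok, hodd⟩]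
      try ring
    · rw [if_pos hok, if_neg hodd, if_neg (by tauto)]
      try ring
  · rw [if_neg hok, if_neg (by tauto)]
    try ring

lemma pvMain (xs : List Int) :
    conta_minimi_storici_dispari xs = conta_minimi_storici_dispari_alt xs := by
  rw [pvB_eq]
  induction xs using List.reverseRecOn with
  | nil => rfl
  | append_singleton ys x ih =>
    rw [pvA_append, pvCnt_append, ih]

-- ===== VERDICT (by name: the statement is the Claim_ definition above) =====
theorem conta_minimi_storici_dispari_spec : Claim_equal_conta_minimi_storici_dispari := by
  intro xs _
  exact pvMain xs
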